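-- pv_equiv track=rewrite | github.com/dimitris1208/Web-Scraping | Fyliana/script.py | consolidate_products
-- ===== SOURCE A (Python) =====
-- def consolidate_products(products):
--     """
--     Consolidate duplicate products by SKU and combine their features into a comma-separated list.
--     """
--     consolidated = {}
--     for product in products:
--         sku = product["sku"]
--         if sku in consolidated:
--             existing_product = consolidated[sku]
--             existing_feature = existing_product["attribute:Feature"]
--             new_feature = product["attribute:Feature"]
--             if new_feature and new_feature not in existing_feature:
--                 consolidated[sku]["attribute:Feature"] = f"{existing_feature},{new_feature}".strip(",")
--         else:
--             consolidated[sku] = product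
--     return list(consolidated.values())
-- ===== SOURCE B (Python) =====
-- def consolidate_products(products):
--     """
--     Consolidate duplicate products by SKU and combine their features into a comma-separated list.
--     Two passes: group products by SKU in first-seen order, then fold each group's
--     features into its first product (mutating that same dict, as the original does).
--     """
--     groups = {}
--     for product in products:
--         groups.setdefault(product["sku"], []).append(product)
--     result = []
--     for group in groups.values():
--         merged = group[0]
--         for product in group[1:]:
--             new_feature = product["attribute:Feature"]
--             existing_feature = merged["attribute:Feature"]
--             if new_feature and new_feature not in existing_feature:
--                 merged["attribute:Feature"] = f"{existing_feature},{new_feature}".strip(",")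
--         result.append(merged)
--     return result
-- ===== Notes on version B (the rewrite author's own statement) =====
-- stated objective: alternative
-- what changed: A merges in a single pass over the products, keyed by a SKU-to-merged-product dict; B first groups the products by SKU into lists (setdefault/append) and then, in a second pass, folds each group's features into its first product.
import Mathlib
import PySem

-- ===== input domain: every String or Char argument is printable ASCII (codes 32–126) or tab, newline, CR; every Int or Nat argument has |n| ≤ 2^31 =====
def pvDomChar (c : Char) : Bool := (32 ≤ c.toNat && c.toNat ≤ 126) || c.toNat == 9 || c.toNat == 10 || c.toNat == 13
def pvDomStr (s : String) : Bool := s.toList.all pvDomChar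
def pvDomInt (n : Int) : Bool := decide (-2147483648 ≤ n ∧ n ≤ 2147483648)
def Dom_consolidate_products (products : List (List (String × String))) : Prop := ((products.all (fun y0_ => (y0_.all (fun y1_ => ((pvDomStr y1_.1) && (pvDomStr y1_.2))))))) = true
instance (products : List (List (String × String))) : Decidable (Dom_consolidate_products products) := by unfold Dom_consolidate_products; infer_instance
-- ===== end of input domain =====

-- B replaces A's single dict-of-merged-products loop by two passes (group the products by SKU,
-- then fold each group's features into its first product); objective: alternative decomposition.
-- Both A and B mutate the first-occurrence product dicts of the input in place (same mutation);
-- the equivalence proved here is about the return value.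

-- shared primitives: `p[k]` on a product dict (Pre_ guarantees the key is present where Python
-- reads it; "" is the total-function default, never reached inside Pre_), `p[k] = v`, and the
-- feature combination f"{ef},{nf}".strip(",")
def pyGetItem (p : List (String × String)) (k : String) : String :=
  (((p.find? (fun q => q.1 == k)).map (fun q => q.2)).getD "")

def pySetItem (p : List (String × String)) (k v : String) : List (String × String) :=
  match p with
  | [] => [(k, v)]
  | q :: t => if q.1 == k then (k, v) :: t else q :: pySetItem t k v

def pvCombine (ef nf : String) : String :=
  PySem.Str.stripChars (String.ofList (ef.toList ++ ',' :: nf.toList)) ","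

-- ===== PORT A =====
-- body of A's single loop over `products`
def pvAStep (consolidated : PySem.Dict String (List (String × String)))
    (product : List (String × String)) : PySem.Dict String (List (String × String)) :=
  let sku := pyGetItem product "sku"
  if consolidated.contains sku then
    let existing_product := consolidated.getD sku []
    let existing_feature := pyGetItem existing_product "attribute:Feature"
    let new_feature := pyGetItem product "attribute:Feature"
    if new_feature ≠ "" ∧ PySem.Str.isIn new_feature existing_feature = false then
      consolidated.insert sku (pySetItem existing_product "attribute:Feature" (pvCombine existing_feature new_feature))
    else consolidated
  else consolidated.insert sku product

def consolidate_products (products : List (List (String × String))) : List (List (String × String)) :=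
  (products.foldl pvAStep PySem.Dict.empty).values

-- ===== PORT B =====
-- B pass 1 body: groups.setdefault(product["sku"], []).append(product)
def pvGroupStep (groups : PySem.Dict String (List (List (String × String))))
    (product : List (String × String)) : PySem.Dict String (List (List (String × String))) :=
  groups.modify (pyGetItem product "sku") [] (fun g => g ++ [product])

-- B inner loop body: fold one product's feature into the merged (first) product
def pvMergeFeature (merged product : List (String × String)) : List (String × String) :=
  let new_feature := pyGetItem product "attribute:Feature"
  let existing_feature := pyGetItem merged "attribute:Feature"
  if new_feature ≠ "" ∧ PySem.Str.isIn new_feature existing_feature = false then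
    pySetItem merged "attribute:Feature" (pvCombine existing_feature new_feature)
  else merged

-- B pass 2 body for one group (groups never hold an empty list; [] is the total-function default)
def pvCollapse (group : List (List (String × String))) : List (String × String) :=
  match group with
  | [] => []
  | first :: rest => rest.foldl pvMergeFeature first

def consolidate_products_alt (products : List (List (String × String))) : List (List (String × String)) :=
  let groups := products.foldl pvGroupStep PySem.Dict.empty
  groups.values.foldl (fun result group => result ++ [pvCollapse group]) []

-- ===== PRECONDITION & SPEC =====
-- Pre_ is exactly where the Python A returns: every product has a "sku" key, and every product
-- whose SKU occurs more than once also has an "attribute:Feature" key (otherwise A raises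
-- KeyError).  It additionally requires each product's keys to be distinct, which only excludes
-- association lists that do not denote a Python dict at all (a Python dict cannot have
-- duplicate keys), not any input the Python A is ever given.
def Pre_consolidate_products (products : List (List (String × String))) : Prop :=
  ∀ p ∈ products,
    (p.map (fun q => q.1)).Nodup ∧
    "sku" ∈ p.map (fun q => q.1) ∧
    (1 < products.countP (fun q => pyGetItem q "sku" == pyGetItem p "sku") →
      "attribute:Feature" ∈ p.map (fun q => q.1))
instance (products : List (List (String × String))) : Decidable (Pre_consolidate_products products) := by
  unfold Pre_consolidate_products; infer_instance

def pvWitness_consolidate_products : (List (List (String × String))) :=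
  [[("sku", "a"), ("attribute:Feature", "red")],
   [("sku", "b"), ("name", "lamp")],
   [("sku", "a"), ("attribute:Feature", "blue")]]

def Spec_consolidate_products (products : List (List (String × String))) (out : List (List (String × String))) : Prop := out = consolidate_products_alt products
instance (products : List (List (String × String))) (out : List (List (String × String))) : Decidable (Spec_consolidate_products products out) := by unfold Spec_consolidate_products; infer_instance

-- ===== CLAIM (what is proved, stated in full; the proofs are below) =====
def Claim_equal_consolidate_products : Prop := ∀ (products : List (List (String × String))), Dom_consolidate_products products → Pre_consolidate_products products → Spec_consolidate_products products (consolidate_products products)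

-- ===== LEMMAS AND PROOFS =====

-- proof-side: A's accumulator is B's group dict with every group collapsed
def pvMapD (g : PySem.Dict String (List (List (String × String)))) :
    PySem.Dict String (List (String × String)) :=
  PySem.Dict.mk (g.items.map (fun kv => (kv.1, pvCollapse kv.2)))

lemma pvMapD_contains (g : PySem.Dict String (List (List (String × String)))) (s : String) :
    (pvMapD g).contains s = g.contains s := by
  simp only [pvMapD, PySem.Dict.contains, List.any_map]
  rfl

lemma pvMapD_get? (g : PySem.Dict String (List (List (String × String)))) (s : String) :
    (pvMapD g).get? s = (g.get? s).map pvCollapse := by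
  simp only [pvMapD, PySem.Dict.get?, List.find?_map, Option.map_map]
  rfl

lemma pvMapD_insert (g : PySem.Dict String (List (List (String × String)))) (s : String)
    (w : List (List (String × String))) :
    pvMapD (g.insert s w) = (pvMapD g).insert s (pvCollapse w) := by
  simp only [PySem.Dict.insert, pvMapD_contains]
  by_cases h : g.contains s = true
  · simp only [h, if_true, pvMapD, List.map_map]
    congr 1
    apply List.map_congr_left
    intro kv _
    by_cases hk : (kv.1 == s) = true <;> simp [Function.comp, hk]
  · simp only [h, if_false, pvMapD, List.map_append, List.map_cons, List.map_nil, Bool.false_eq_true]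

lemma pvCollapse_append (grp : List (List (String × String))) (p : List (String × String))
    (h : grp ≠ []) : pvCollapse (grp ++ [p]) = pvMergeFeature (pvCollapse grp) p := by
  match grp with
  | [] => exact absurd rfl h
  | f :: r => simp [pvCollapse, List.foldl_append]

-- reinserting the value a key already holds is the identity (keys unique)
lemma insert_getD_self (d : PySem.Dict String (List (String × String))) (k : String)
    (hnd : d.keys.Nodup) (hc : d.contains k = true) :
    d.insert k (d.getD k []) = d := by
  simp only [PySem.Dict.insert, hc, if_true]
  cases d with
  | mk items =>
    apply PySem.Dict.ext
    conv_rhs => rw [← List.map_id items]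
    apply List.map_congr_left
    intro kv hkv
    by_cases hk : (kv.1 == k) = true
    · have hk' : kv.1 = k := by exact eq_of_beq hk
      have : (PySem.Dict.mk items).get? kv.1 = some kv.2 := by
        have := PySem.Dict.get?_of_mem_items (d := PySem.Dict.mk items) (k := kv.1) (v := kv.2)
        exact this hkv hnd
      simp only [hk, if_true, id]
      rw [hk'] at this
      have hgd : (PySem.Dict.mk items).getD k [] = kv.2 := by
        simp [PySem.Dict.getD, this]
      rw [hgd, ← hk']
    · simp [hk]

-- one step of A on the collapsed dict = collapsing after one step of B
lemma pvStep_eq (g : PySem.Dict String (List (List (String × String))))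
    (p : List (String × String))
    (hnd : g.keys.Nodup) (hne : ∀ grp ∈ g.values, grp ≠ []) :
    pvAStep (pvMapD g) p = pvMapD (pvGroupStep g p) := by
  simp only [pvAStep, pvGroupStep, PySem.Dict.modify, pvMapD_contains]
  by_cases hc : g.contains (pyGetItem p "sku") = true
  · set s := pyGetItem p "sku" with hs
    obtain ⟨kv, hfind⟩ : ∃ kv, g.items.find? (fun q => q.1 == s) = some kv := by
      have : (g.items.find? (fun q => q.1 == s)).isSome = true := by
        rw [List.find?_isSome]
        simpa [PySem.Dict.contains, List.any_eq_true] using hc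
      exact Option.isSome_iff_exists.mp this
    have hget : g.get? s = some kv.2 := by simp [PySem.Dict.get?, hfind]
    have hmem : kv ∈ g.items := List.mem_of_find?_eq_some hfind
    have hne' : kv.2 ≠ [] := hne kv.2 (by
      simp only [PySem.Dict.values]
      exact List.mem_map.mpr ⟨kv, hmem, rfl⟩)
    have hgd : g.getD s [] = kv.2 := by simp [PySem.Dict.getD, hget]
    have hgd' : (pvMapD g).getD s [] = pvCollapse kv.2 := by
      simp [PySem.Dict.getD, pvMapD_get?, hget]
    rw [pvMapD_insert, hgd, pvCollapse_append _ _ hne', hgd']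
    simp only [hc, if_true, pvMergeFeature]
    by_cases hcond : pyGetItem p "attribute:Feature" ≠ "" ∧
        PySem.Str.isIn (pyGetItem p "attribute:Feature")
          (pyGetItem (pvCollapse kv.2) "attribute:Feature") = false
    · rw [if_pos hcond, if_pos hcond]
    · rw [if_neg hcond, if_neg hcond, ← hgd']
      refine (insert_getD_self (pvMapD g) s ?_ ?_).symm
      · have hk : (pvMapD g).keys = g.keys := by
          simp only [pvMapD, PySem.Dict.keys, List.map_map]
          rfl
        rw [hk]; exact hnd
      · rw [pvMapD_contains]; exact hc
  · rw [pvMapD_insert]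
    have hget : g.get? (pyGetItem p "sku") = none := by
      have h2 := PySem.Dict.contains_eq_isSome_get? g (pyGetItem p "sku")
      rw [h2] at hc
      exact Option.not_isSome_iff_eq_none.mp (by simpa using hc)
    simp [hc, PySem.Dict.getD, hget, pvCollapse]

lemma pvGroupStep_keys_nodup (g : PySem.Dict String (List (List (String × String))))
    (p : List (String × String)) (hnd : g.keys.Nodup) : (pvGroupStep g p).keys.Nodup := by
  simp only [pvGroupStep, PySem.Dict.modify]
  exact PySem.Dict.nodup_keys_insert g _ _ hnd

lemma pvGroupStep_values_ne_nil (g : PySem.Dict String (List (List (String × String))))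
    (p : List (String × String)) (hne : ∀ grp ∈ g.values, grp ≠ []) :
    ∀ grp ∈ (pvGroupStep g p).values, grp ≠ [] := by
  intro grp hgrp
  simp only [pvGroupStep, PySem.Dict.modify] at hgrp
  rcases PySem.Dict.mem_values_insert _ _ _ _ hgrp with h | h
  · rw [h]
    exact fun hcontra => by simpa using congrArg List.length hcontra
  · exact hne grp h

lemma pvLoop_eq (l : List (List (String × String)))
    (g : PySem.Dict String (List (List (String × String))))
    (hnd : g.keys.Nodup) (hne : ∀ grp ∈ g.values, grp ≠ []) :
    l.foldl pvAStep (pvMapD g) = pvMapD (l.foldl pvGroupStep g) := by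
  induction l generalizing g with
  | nil => rfl
  | cons p t ih =>
    simp only [List.foldl_cons]
    rw [pvStep_eq g p hnd hne]
    exact ih (pvGroupStep g p) (pvGroupStep_keys_nodup g p hnd)
      (pvGroupStep_values_ne_nil g p hne)

-- ===== VERDICT (by name: the statement is the Claim_ definition above) =====
theorem consolidate_products_spec : Claim_equal_consolidate_products := by
  intro products _ _
  unfold Spec_consolidate_products consolidate_products consolidate_products_alt
  have h0 : (PySem.Dict.empty : PySem.Dict String (List (String × String))) =
      pvMapD PySem.Dict.empty := rfl
  rw [h0, pvLoop_eq products PySem.Dict.empty (by simp [PySem.Dict.keys, PySem.Dict.empty])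
    (by simp [PySem.Dict.values, PySem.Dict.empty])]
  rw [PySem.List.foldl_append_singleton_eq_map]
  simp [pvMapD, PySem.Dict.values, List.map_map, Function.comp]
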